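-- pv_equiv track=rewrite | github.com/ozhang238/Katiss_solutions | zero_one_sequences/zero_one_sequences.py | count
-- ===== SOURCE A (Python) =====
-- def count(s):
--     ones = 0
--     branches = 0
--     total = 0
--     for char in s:
--         if (char == '0'):
--             total += ones + branches
--         elif ( char == '1'):
--             ones += 1
--         elif ( char == '?'):
--
--             total += ones + branches
--             ones += 1
--             branches += 1
--     return total
-- ===== SOURCE B (Python) =====
-- def count(s):
--     # Right-to-left pass: count later '0'/'?' consumers and credit them to each '1'/'?'.
--     consumers = 0
--     total = 0
--     for char in reversed(s):
--         if char == '0':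
--             consumers += 1
--         elif char == '1':
--             total += consumers
--         elif char == '?':
--             total += 2 * consumers
--             consumers += 1
--     return total
-- ===== Notes on version B (the rewrite author's own statement) =====
-- stated objective: alternative
-- what changed: Replaces the forward pass with ones/branches/total accumulators by a right-to-left pass keeping a single counter of consumer characters (zeros and question marks) seen so far from the right, crediting each one-character once and each question mark twice.
import Mathlib
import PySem

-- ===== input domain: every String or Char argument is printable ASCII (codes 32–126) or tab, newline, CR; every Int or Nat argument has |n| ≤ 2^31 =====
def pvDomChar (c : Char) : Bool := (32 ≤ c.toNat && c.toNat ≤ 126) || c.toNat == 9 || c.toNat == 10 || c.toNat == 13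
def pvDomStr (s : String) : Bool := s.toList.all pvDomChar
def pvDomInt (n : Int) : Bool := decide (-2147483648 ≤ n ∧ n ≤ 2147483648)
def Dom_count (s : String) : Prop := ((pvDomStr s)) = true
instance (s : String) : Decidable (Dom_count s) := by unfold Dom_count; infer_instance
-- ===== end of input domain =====

-- B replaces A's forward ones/branches pass by a reversed pass with one consumer counter (alternative decomposition).

-- ===== PORT A =====
-- state = (ones, branches, total); one step of A's loop body
def countStepA (st : Int × Int × Int) (c : Char) : Int × Int × Int :=
  if c = '0' then (st.1, st.2.1, st.2.2 + st.1 + st.2.1)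
  else if c = '1' then (st.1 + 1, st.2.1, st.2.2)
  else if c = '?' then (st.1 + 1, st.2.1 + 1, st.2.2 + st.1 + st.2.1)
  else st

def count (s : String) : Int :=
  (s.toList.foldl countStepA (0, 0, 0)).2.2

-- ===== PORT B =====
-- state = (consumers, total); one step of B's loop body over reversed(s)
def countStepB (st : Int × Int) (c : Char) : Int × Int :=
  if c = '0' then (st.1 + 1, st.2)
  else if c = '1' then (st.1, st.2 + st.1)
  else if c = '?' then (st.1 + 1, st.2 + 2 * st.1)
  else st

def count_alt (s : String) : Int :=
  (s.toList.reverse.foldl countStepB (0, 0)).2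

-- ===== PRECONDITION & SPEC =====
def Spec_count (s : String) (out : Int) : Prop := out = count_alt s
instance (s : String) (out : Int) : Decidable (Spec_count s out) := by unfold Spec_count; infer_instance

-- ===== CLAIM (what is proved, stated in full; the proofs are below) =====
def Claim_equal_count : Prop := ∀ (s : String), Dom_count s → Spec_count s (count s)

-- ===== LEMMAS AND PROOFS =====

-- B's fold over the reverse, seen as a foldr on the original list
def pairB (l : List Char) : Int × Int :=
  l.foldr (fun c st => countStepB st c) (0, 0)

theorem foldl_reverse_eq_pairB (l : List Char) :
    l.reverse.foldl countStepB (0, 0) = pairB l := by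
  simp [pairB, List.foldl_reverse]

-- key invariant: A's fold from an arbitrary state, in terms of pairB
theorem pairB_cons (c : Char) (l : List Char) :
    pairB (c :: l) = countStepB (pairB l) c := rfl

theorem countA_invariant (l : List Char) :
    ∀ (o b t : Int),
      (l.foldl countStepA (o, b, t)).2.2
        = t + (o + b) * (pairB l).1 + (pairB l).2 := by
  induction l with
  | nil => intro o b t; simp [pairB]
  | cons c l ih =>
    intro o b t
    rw [pairB_cons]
    by_cases h0 : c = '0'
    · simp [countStepA, countStepB, h0, ih]; ring
    · by_cases h1 : c = '1'
      · simp [countStepA, countStepB, h0, h1, ih]; ring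
      · by_cases hq : c = '?'
        · simp [countStepA, countStepB, h0, h1, hq, ih]; ring
        · simp [countStepA, countStepB, h0, h1, hq, ih]

-- ===== VERDICT (by name: the statement is the Claim_ definition above) =====
theorem count_spec : Claim_equal_count := by
  intro s _
  unfold Spec_count count count_alt
  rw [foldl_reverse_eq_pairB, countA_invariant]
  ring
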